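-- pv_equiv track=rewrite | github.com/jonasfoe/PANDORA | PANDORA/Pandora/Modelling_functions.py | allele_name_adapter
-- ===== SOURCE A (Python) =====
-- def allele_name_adapter(allele, available_alleles):
--     '''
--     Cuts the given allele name to make it consistent with the alleles in allele_ID.
--
--     Args:
--         allele(list) : Allele names
--         allele_ID(dict) : Dictionary of structure IDs (values) in the dataset for each allele (keys)
--     '''
--     #homolog_allele = '--NONE--'
--     for a in range(len(allele)):
--         if allele[a].startswith('HLA'):      # Human
--             if any(allele[a] in key for key in list(available_alleles)):
--                 pass
--             elif any(allele[a][:8] in key for key in list(available_alleles)):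
--                 allele[a] = allele[a][:8]
--             elif any(allele[a][:6] in key for key in list(available_alleles)):
--                 allele[a] = allele[a][:6]
--             else:
--                 allele[a] = allele[a][:4]
--         elif allele[a].startswith('H2'):    # Mouse
--             #homolog_allele = 'RT1'
--             if any(allele[a] in key for key in list(available_alleles)):
--                 pass
--             elif any(allele[a][:4] in key for key in list(available_alleles)):
--                 allele[a] = allele[a][:4]
--             else:
--                 allele[a] = allele[a][:3]
--         elif allele[a].startswith('RT1'):          # Rat
--             #homolog_allele = 'H2'
--             if any(allele[a] in key for key in list(available_alleles)):
--                 pass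
--             elif any(allele[a][:5] in key for key in list(available_alleles)):
--                 allele[a] = allele[a][:5]
--             else:
--                 allele[a] = allele[a][:4]
--         elif allele[a].startswith('BoLA'):        # Bovine
--             if any(allele[a] in key for key in list(available_alleles)):
--                 pass
--             elif any(allele[a][:10] in key for key in list(available_alleles)):
--                 allele[a] = allele[a][:10]
--             elif any(allele[a][:7] in key for key in list(available_alleles)):
--                 allele[a] = allele[a][:7]
--             else:
--                 allele[a] = allele[a][:5]
--         elif allele[a].startswith('SLA'):        # Suine
--             if any(allele[a] in key for key in list(available_alleles)):
--                 pass
--             elif any(allele[a][:9] in key for key in list(available_alleles)):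
--                 allele[a] = allele[a][:9]
--             elif any(allele[a][:6] in key for key in list(available_alleles)):
--                 allele[a] = allele[a][:6]
--             else:
--                 allele[a] = allele[a][:4]
--         elif allele[a].startswith('MH1-B'):        # Chicken
--             if any(allele[a] in key for key in list(available_alleles)):
--                 pass
--             elif any(allele[a][:8] in key for key in list(available_alleles)):
--                 allele[a] = allele[a][:8]
--             else:
--                 allele[a] = allele[a][:6]
--         elif allele[a].startswith('MH1-N'):        # Chicken
--             if any(allele[a] in key for key in list(available_alleles)):
--                 pass
--             elif any(allele[a][:9] in key for key in list(available_alleles)):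
--                 allele[a] = allele[a][:9]
--             else:
--                 allele[a] = allele[a][:6]
--         elif allele[a].startswith('BF2'):        # Chicken
--             if any(allele[a] in key for key in list(available_alleles)):
--                 pass
--             elif any(allele[a][:6] in key for key in list(available_alleles)):
--                 allele[a] = allele[a][:6]
--             else:
--                 allele[a] = allele[a][:4]
--         elif allele[a].startswith('Mamu'):       # Monkey
--             if any(allele[a] in key for key in list(available_alleles)):
--                 pass
--             elif any(allele[a][:13] in key for key in list(available_alleles)):
--                 allele[a] = allele[a][:13]
--             elif any(allele[a][:9] in key for key in list(available_alleles)):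
--                 allele[a] = allele[a][:9]
--             else:
--                 allele[a] = allele[a][:5]
--         elif allele[a].startswith('Eqca'):        # Horse
--             if any(allele[a] in key for key in list(available_alleles)):
--                 pass
--             elif any(allele[a][:10] in key for key in list(available_alleles)):
--                 allele[a] = allele[a][:10]
--             elif any(allele[a][:7] in key for key in list(available_alleles)):
--                 allele[a] = allele[a][:7]
--             else:
--                 allele[a] = allele[a][:5]
--     return(allele)#, homolog_allele)
-- ===== SOURCE B (Python) =====
-- # Loop-interchange rewrite: for each allele, candidates (full name + truncations) are
-- # ranked once, then available_alleles is scanned a single time while tracking the index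
-- # of the best-priority candidate seen so far (the candidate window shrinks as matches
-- # are found); A instead re-scans all keys once per candidate length.
-- # Mutates `allele` in place and returns it (like A).
--
-- _SPECIES = [
--     ("HLA", (8, 6), 4),
--     ("H2", (4,), 3),
--     ("RT1", (5,), 4),
--     ("BoLA", (10, 7), 5),
--     ("SLA", (9, 6), 4),
--     ("MH1-B", (8,), 6),
--     ("MH1-N", (9,), 6),
--     ("BF2", (6,), 4),
--     ("Mamu", (13, 9), 5),
--     ("Eqca", (10, 7), 5),
-- ]
--
--
-- def allele_name_adapter(allele, available_alleles):
--     for a, name in enumerate(allele):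
--         for prefix, lengths, fallback in _SPECIES:
--             if name.startswith(prefix):
--                 cands = [name] + [name[:n] for n in lengths]
--                 best = len(cands)  # index of the best-priority matching candidate; len = none yet
--                 for key in available_alleles:
--                     for i in range(best):
--                         if cands[i] in key:
--                             best = i
--                             break
--                 allele[a] = cands[best] if best < len(cands) else name[:fallback]
--                 break
--     return allele
-- ===== Notes on version B (the rewrite author's own statement) =====
-- stated objective: alternative
-- what changed: Instead of A's ten copied if/elif chains each rescanning available_alleles once per candidate truncation, B ranks each allele's candidates (full name then truncations) once and makes a single pass over available_alleles, tracking the index of the best-priority candidate contained in any key seen so far (the candidate search window shrinks as matches are found), then assigns that candidate or the fallback truncation.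
import Mathlib
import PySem

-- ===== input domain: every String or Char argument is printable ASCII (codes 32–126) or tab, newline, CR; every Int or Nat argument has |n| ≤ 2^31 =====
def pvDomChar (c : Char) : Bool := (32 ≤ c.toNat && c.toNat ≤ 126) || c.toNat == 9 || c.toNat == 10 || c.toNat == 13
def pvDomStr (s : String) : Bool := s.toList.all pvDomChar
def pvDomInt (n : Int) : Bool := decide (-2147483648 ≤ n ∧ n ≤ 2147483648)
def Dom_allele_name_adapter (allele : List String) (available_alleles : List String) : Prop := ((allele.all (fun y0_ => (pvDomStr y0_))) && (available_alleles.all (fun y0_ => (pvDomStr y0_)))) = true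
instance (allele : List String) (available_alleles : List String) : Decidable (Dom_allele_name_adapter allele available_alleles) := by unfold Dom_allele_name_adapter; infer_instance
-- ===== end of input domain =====

-- B ranks each allele's candidate names (full name, then its truncations) once and then makes a
-- SINGLE pass over available_alleles, tracking the index of the best-priority candidate contained
-- in any key seen so far (the candidate window shrinks as matches are found); A instead runs one
-- full membership scan of the keys per candidate length in ten copied if/elif chains (alternative
-- decomposition, same return value). Both Pythons mutate `allele` in place and return it; the
-- theorems here are about the returned value.

-- ===== PORT A =====
-- `any(t in key for key in list(available_alleles))`
def anaAny (available_alleles : List String) (t : String) : Bool :=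
  available_alleles.any (fun key => PySem.Str.isIn t key)

-- `s[:n]`
def anaCut (s : String) (n : Int) : String := PySem.Str.slice s none (some n)

-- the body of A's for-loop for one element allele[a] = s: the ten-branch if/elif chain
-- (a `pass` branch returns s unchanged)
def anaStepA (available_alleles : List String) (s : String) : String :=
  if PySem.Str.startswith s "HLA" then
    if anaAny available_alleles s then s
    else if anaAny available_alleles (anaCut s 8) then anaCut s 8
    else if anaAny available_alleles (anaCut s 6) then anaCut s 6
    else anaCut s 4
  else if PySem.Str.startswith s "H2" then
    if anaAny available_alleles s then s
    else if anaAny available_alleles (anaCut s 4) then anaCut s 4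
    else anaCut s 3
  else if PySem.Str.startswith s "RT1" then
    if anaAny available_alleles s then s
    else if anaAny available_alleles (anaCut s 5) then anaCut s 5
    else anaCut s 4
  else if PySem.Str.startswith s "BoLA" then
    if anaAny available_alleles s then s
    else if anaAny available_alleles (anaCut s 10) then anaCut s 10
    else if anaAny available_alleles (anaCut s 7) then anaCut s 7
    else anaCut s 5
  else if PySem.Str.startswith s "SLA" then
    if anaAny available_alleles s then s
    else if anaAny available_alleles (anaCut s 9) then anaCut s 9
    else if anaAny available_alleles (anaCut s 6) then anaCut s 6
    else anaCut s 4
  else if PySem.Str.startswith s "MH1-B" then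
    if anaAny available_alleles s then s
    else if anaAny available_alleles (anaCut s 8) then anaCut s 8
    else anaCut s 6
  else if PySem.Str.startswith s "MH1-N" then
    if anaAny available_alleles s then s
    else if anaAny available_alleles (anaCut s 9) then anaCut s 9
    else anaCut s 6
  else if PySem.Str.startswith s "BF2" then
    if anaAny available_alleles s then s
    else if anaAny available_alleles (anaCut s 6) then anaCut s 6
    else anaCut s 4
  else if PySem.Str.startswith s "Mamu" then
    if anaAny available_alleles s then s
    else if anaAny available_alleles (anaCut s 13) then anaCut s 13
    else if anaAny available_alleles (anaCut s 9) then anaCut s 9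
    else anaCut s 5
  else if PySem.Str.startswith s "Eqca" then
    if anaAny available_alleles s then s
    else if anaAny available_alleles (anaCut s 10) then anaCut s 10
    else if anaAny available_alleles (anaCut s 7) then anaCut s 7
    else anaCut s 5
  else s

-- `for a in range(len(allele)): ... allele[a] = ...` — index loop updating the list in place
def allele_name_adapter (allele : List String) (available_alleles : List String) : List String :=
  (PySem.List.pyRange 0 (PySem.List.len allele) 1).foldl
    (fun al a => al.set a.toNat (anaStepA available_alleles (PySem.List.pyGetD al a ""))) allele

-- ===== PORT B =====
-- Source B's _SPECIES table: prefix, truncation lengths, fallback length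
def anabTable : List (String × List Int × Int) :=
  [("HLA", ([8, 6], 4)), ("H2", ([4], 3)), ("RT1", ([5], 4)), ("BoLA", ([10, 7], 5)),
   ("SLA", ([9, 6], 4)), ("MH1-B", ([8], 6)), ("MH1-N", ([9], 6)), ("BF2", ([6], 4)),
   ("Mamu", ([13, 9], 5)), ("Eqca", ([10, 7], 5))]

-- Source B's key loop: one pass over the keys; per key, `for i in range(best): if cands[i] in key:
-- best = i; break` — the inner for-with-break is `find?` over `range best`
def anabPick (keys : List String) (cands : List String) (fb : String) : String :=
  let best := keys.foldl (fun best key =>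
      match (List.range best).find? (fun i => PySem.Str.isIn (cands.getD i "") key) with
      | some i => i
      | none => best) cands.length
  if best < cands.length then cands.getD best "" else fb

-- Source B's inner `for prefix, lengths, fallback in _SPECIES: if name.startswith(prefix): ...; break`
def anabStep (keys : List String) (s : String) : String :=
  match anabTable.find? (fun e => PySem.Str.startswith s e.1) with
  | none => s
  | some e =>
    anabPick keys (s :: e.2.1.map (fun n => PySem.Str.slice s none (some n)))
      (PySem.Str.slice s none (some e.2.2))

-- `for a, name in enumerate(allele): allele[a] = ...; return allele`
def allele_name_adapter_alt (allele : List String) (available_alleles : List String) : List String :=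
  allele.map (anabStep available_alleles)

-- ===== PRECONDITION & SPEC =====
def Spec_allele_name_adapter (allele : List String) (available_alleles : List String) (out : List String) : Prop := out = allele_name_adapter_alt allele available_alleles
instance (allele : List String) (available_alleles : List String) (out : List String) : Decidable (Spec_allele_name_adapter allele available_alleles out) := by unfold Spec_allele_name_adapter; infer_instance

-- ===== CLAIM (what is proved, stated in full; the proofs are below) =====
def Claim_equal_allele_name_adapter : Prop := ∀ (allele : List String) (available_alleles : List String), Dom_allele_name_adapter allele available_alleles → Spec_allele_name_adapter allele available_alleles (allele_name_adapter allele available_alleles)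

-- ===== LEMMAS AND PROOFS =====

-- find? only depends on the predicate's values on the list
theorem pvFind?_congr {α : Type} (l : List α) (p q : α → Bool) (h : ∀ x ∈ l, p x = q x) :
    l.find? p = l.find? q := by
  induction l with
  | nil => rfl
  | cons x xs ih =>
    have hx := h x (List.mem_cons_self)
    cases hq : q x
    · rw [List.find?_cons_of_neg (by simp [hx, hq]), List.find?_cons_of_neg (by simp [hq])]
      exact ih (fun y hy => h y (List.mem_cons_of_mem _ hy))
    · rw [List.find?_cons_of_pos (by rw [hx, hq]), List.find?_cons_of_pos (by rw [hq])]

-- B's key loop: starting from window bound b0, the fold computes the least index i < b0 whose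
-- candidate is contained in some key (b0 if none)
theorem pvFoldBest_char (cands keys : List String) (b0 : ℕ) :
    keys.foldl (fun best key =>
        match (List.range best).find? (fun i => PySem.Str.isIn (cands.getD i "") key) with
        | some i => i
        | none => best) b0
      = ((List.range b0).find?
          (fun i => keys.any (fun k => PySem.Str.isIn (cands.getD i "") k))).getD b0 := by
  induction keys generalizing b0 with
  | nil =>
    have : (List.range b0).find?
        (fun i => ([] : List String).any (fun k => PySem.Str.isIn (cands.getD i "") k)) = none :=
      List.find?_eq_none.mpr (fun x _ => by simp)
    rw [List.foldl_nil, this]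
    rfl
  | cons k ks ih =>
    rw [List.foldl_cons]
    cases h : (List.range b0).find? (fun i => PySem.Str.isIn (cands.getD i "") k) with
    | none =>
      have hnone := List.find?_range_eq_none.mp h
      rw [ih]
      have : (List.range b0).find?
            (fun i => (k :: ks).any (fun x => PySem.Str.isIn (cands.getD i "") x))
          = (List.range b0).find? (fun i => ks.any (fun x => PySem.Str.isIn (cands.getD i "") x)) := by
        apply pvFind?_congr
        intro i hi
        have := hnone i (List.mem_range.mp hi)
        simp only [List.any_cons]
        simp only [Bool.not_eq_eq_eq_not, Bool.not_true] at this
        rw [this, Bool.false_or]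
      rw [this]
    | some i =>
      obtain ⟨hpi, hmem, hmin⟩ := List.find?_range_eq_some.mp h
      have hib0 : i < b0 := List.mem_range.mp hmem
      rw [ih]
      cases h2 : (List.range i).find? (fun j => ks.any (fun x => PySem.Str.isIn (cands.getD j "") x)) with
      | some m =>
        obtain ⟨hpm, hmmem, hmmin⟩ := List.find?_range_eq_some.mp h2
        have hmi : m < i := List.mem_range.mp hmmem
        have : (List.range b0).find?
              (fun j => (k :: ks).any (fun x => PySem.Str.isIn (cands.getD j "") x)) = some m := by
          apply List.find?_range_eq_some.mpr
          refine ⟨by simp only [List.any_cons, hpm, Bool.or_true], List.mem_range.mpr (lt_trans hmi hib0), ?_⟩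
          intro j hj
          have h1 := hmin j (lt_trans hj hmi)
          have h2' := hmmin j hj
          simp only [Bool.not_eq_eq_eq_not, Bool.not_true] at h1 h2' ⊢
          simp only [List.any_cons, h1, h2', Bool.or_false]
        rw [this]
        rfl
      | none =>
        have hnone2 := List.find?_range_eq_none.mp h2
        have : (List.range b0).find?
              (fun j => (k :: ks).any (fun x => PySem.Str.isIn (cands.getD j "") x)) = some i := by
          apply List.find?_range_eq_some.mpr
          refine ⟨by simp only [List.any_cons, hpi, Bool.true_or], hmem, ?_⟩
          intro j hj
          have h1 := hmin j hj
          have h2' := hnone2 j hj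
          simp only [Bool.not_eq_eq_eq_not, Bool.not_true] at h1 h2' ⊢
          simp only [List.any_cons, h1, h2', Bool.or_false]
        rw [this]
        rfl

-- searching indices 0..len-1 and reading the element back is find? over the list itself
theorem pvFindIdx_map (l : List String) (p : String → Bool) :
    ((List.range l.length).find? (fun i => p (l.getD i ""))).map (fun i => l.getD i "")
      = l.find? p := by
  induction l with
  | nil => rfl
  | cons x xs ih =>
    rw [List.length_cons, List.range_succ_eq_map]
    cases hp : p x with
    | true =>
      rw [List.find?_cons_of_pos (by simpa using hp), List.find?_cons_of_pos (by simpa using hp)]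
      simp
    | false =>
      rw [List.find?_cons_of_neg (by simpa using hp), List.find?_cons_of_neg (by simpa using hp)]
      rw [List.find?_map]
      have : ((fun i => p ((x :: xs).getD i "")) ∘ Nat.succ) = fun i => p (xs.getD i "") := by
        funext i; rfl
      rw [this, ← ih]
      cases (List.range xs.length).find? fun i => p (xs.getD i "") <;> rfl

-- Source B's best-index scan returns the first candidate (priority order) contained in some key,
-- else the fallback
theorem anabPick_eq (keys cands : List String) (fb : String) :
    anabPick keys cands fb
      = (cands.find? (fun c => keys.any (fun k => PySem.Str.isIn c k))).getD fb := by
  unfold anabPick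
  rw [pvFoldBest_char]
  rw [← pvFindIdx_map cands (fun c => keys.any (fun k => PySem.Str.isIn c k))]
  cases h : (List.range cands.length).find?
      (fun i => keys.any (fun k => PySem.Str.isIn (cands.getD i "") k)) with
  | none => simp [h]
  | some i =>
    obtain ⟨_, hmem, _⟩ := List.find?_range_eq_some.mp h
    simp [h, List.mem_range.mp hmem]

-- per element: B's ranked single-pass scan computes exactly A's if/elif chain
set_option maxHeartbeats 1000000 in
theorem anabStep_eq (av : List String) (s : String) :
    anabStep av s = anaStepA av s := by
  unfold anabStep anabTable anaStepA
  cases h1 : PySem.Str.startswith s "HLA"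
  case true =>
    simp only [List.find?_cons, h1]
    rw [List.map_cons, List.map_cons, List.map_nil, anabPick_eq]
    simp only [List.find?_cons, anaAny, anaCut]
    cases hf : (av.any fun key => PySem.Str.isIn s key) <;>
      cases hc0 : (av.any fun key => PySem.Str.isIn (PySem.Str.slice s none (some 8)) key) <;>
        cases hc1 : (av.any fun key => PySem.Str.isIn (PySem.Str.slice s none (some 6)) key) <;>
          simp [hf, hc0, hc1]
  case false =>
    cases h2 : PySem.Str.startswith s "H2"
    case true =>
      simp only [List.find?_cons, h1, h2]
      rw [List.map_cons, List.map_nil, anabPick_eq]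
      simp only [List.find?_cons, anaAny, anaCut]
      cases hf : (av.any fun key => PySem.Str.isIn s key) <;>
        cases hc0 : (av.any fun key => PySem.Str.isIn (PySem.Str.slice s none (some 4)) key) <;>
          simp [hf, hc0]
    case false =>
      cases h3 : PySem.Str.startswith s "RT1"
      case true =>
        simp only [List.find?_cons, h1, h2, h3]
        rw [List.map_cons, List.map_nil, anabPick_eq]
        simp only [List.find?_cons, anaAny, anaCut]
        cases hf : (av.any fun key => PySem.Str.isIn s key) <;>
          cases hc0 : (av.any fun key => PySem.Str.isIn (PySem.Str.slice s none (some 5)) key) <;>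
            simp [hf, hc0]
      case false =>
        cases h4 : PySem.Str.startswith s "BoLA"
        case true =>
          simp only [List.find?_cons, h1, h2, h3, h4]
          rw [List.map_cons, List.map_cons, List.map_nil, anabPick_eq]
          simp only [List.find?_cons, anaAny, anaCut]
          cases hf : (av.any fun key => PySem.Str.isIn s key) <;>
            cases hc0 : (av.any fun key => PySem.Str.isIn (PySem.Str.slice s none (some 10)) key) <;>
              cases hc1 : (av.any fun key => PySem.Str.isIn (PySem.Str.slice s none (some 7)) key) <;>
                simp [hf, hc0, hc1]
        case false =>
          cases h5 : PySem.Str.startswith s "SLA"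
          case true =>
            simp only [List.find?_cons, h1, h2, h3, h4, h5]
            rw [List.map_cons, List.map_cons, List.map_nil, anabPick_eq]
            simp only [List.find?_cons, anaAny, anaCut]
            cases hf : (av.any fun key => PySem.Str.isIn s key) <;>
              cases hc0 : (av.any fun key => PySem.Str.isIn (PySem.Str.slice s none (some 9)) key) <;>
                cases hc1 : (av.any fun key => PySem.Str.isIn (PySem.Str.slice s none (some 6)) key) <;>
                  simp [hf, hc0, hc1]
          case false =>
            cases h6 : PySem.Str.startswith s "MH1-B"
            case true =>
              simp only [List.find?_cons, h1, h2, h3, h4, h5, h6]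
              rw [List.map_cons, List.map_nil, anabPick_eq]
              simp only [List.find?_cons, anaAny, anaCut]
              cases hf : (av.any fun key => PySem.Str.isIn s key) <;>
                cases hc0 : (av.any fun key => PySem.Str.isIn (PySem.Str.slice s none (some 8)) key) <;>
                  simp [hf, hc0]
            case false =>
              cases h7 : PySem.Str.startswith s "MH1-N"
              case true =>
                simp only [List.find?_cons, h1, h2, h3, h4, h5, h6, h7]
                rw [List.map_cons, List.map_nil, anabPick_eq]
                simp only [List.find?_cons, anaAny, anaCut]
                cases hf : (av.any fun key => PySem.Str.isIn s key) <;>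
                  cases hc0 : (av.any fun key => PySem.Str.isIn (PySem.Str.slice s none (some 9)) key) <;>
                    simp [hf, hc0]
              case false =>
                cases h8 : PySem.Str.startswith s "BF2"
                case true =>
                  simp only [List.find?_cons, h1, h2, h3, h4, h5, h6, h7, h8]
                  rw [List.map_cons, List.map_nil, anabPick_eq]
                  simp only [List.find?_cons, anaAny, anaCut]
                  cases hf : (av.any fun key => PySem.Str.isIn s key) <;>
                    cases hc0 : (av.any fun key => PySem.Str.isIn (PySem.Str.slice s none (some 6)) key) <;>
                      simp [hf, hc0]
                case false =>
                  cases h9 : PySem.Str.startswith s "Mamu"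
                  case true =>
                    simp only [List.find?_cons, h1, h2, h3, h4, h5, h6, h7, h8, h9]
                    rw [List.map_cons, List.map_cons, List.map_nil, anabPick_eq]
                    simp only [List.find?_cons, anaAny, anaCut]
                    cases hf : (av.any fun key => PySem.Str.isIn s key) <;>
                      cases hc0 : (av.any fun key => PySem.Str.isIn (PySem.Str.slice s none (some 13)) key) <;>
                        cases hc1 : (av.any fun key => PySem.Str.isIn (PySem.Str.slice s none (some 9)) key) <;>
                          simp [hf, hc0, hc1]
                  case false =>
                    cases h10 : PySem.Str.startswith s "Eqca"
                    case true =>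
                      simp only [List.find?_cons, h1, h2, h3, h4, h5, h6, h7, h8, h9, h10]
                      rw [List.map_cons, List.map_cons, List.map_nil, anabPick_eq]
                      simp only [List.find?_cons, anaAny, anaCut]
                      cases hf : (av.any fun key => PySem.Str.isIn s key) <;>
                        cases hc0 : (av.any fun key => PySem.Str.isIn (PySem.Str.slice s none (some 10)) key) <;>
                          cases hc1 : (av.any fun key => PySem.Str.isIn (PySem.Str.slice s none (some 7)) key) <;>
                            simp [hf, hc0, hc1]
                    case false =>
                      simp_all [List.find?_cons, List.find?_nil]

-- A's index loop, with `done` already processed, maps anaStepA over the remaining suffix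
theorem anaFold_loop (av : List String) (done rest : List String) :
    (PySem.List.pyRange (done.length : Int) ((done.length : Int) + (rest.length : Int)) 1).foldl
      (fun al a => al.set a.toNat (anaStepA av (PySem.List.pyGetD al a ""))) (done ++ rest)
    = done ++ rest.map (anaStepA av) := by
  induction rest generalizing done with
  | nil =>
    rw [show ((done.length : Int) + ((List.length ([] : List String) : Int)) = (done.length : Int)) by simp]
    rw [PySem.List.pyRange_one_eq_nil le_rfl]
    simp
  | cons x xs ih =>
    rw [PySem.List.pyRange_one_cons (by simp only [List.length_cons]; push_cast; omega)]
    simp only [List.foldl_cons]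
    have hget : PySem.List.pyGetD (done ++ x :: xs) (done.length : Int) "" = x := by
      rw [PySem.List.pyGetD_natCast]; simp
    have hset : (done ++ x :: xs).set ((done.length : Int)).toNat (anaStepA av x)
        = (done ++ [anaStepA av x]) ++ xs := by
      simp
    rw [hget, hset]
    have h2 := ih (done ++ [anaStepA av x])
    have harg : ((done ++ [anaStepA av x]).length : Int) = (done.length : Int) + 1 := by simp
    rw [harg] at h2
    have harg2 : (done.length : Int) + 1 + (xs.length : Int)
        = (done.length : Int) + ((x :: xs).length : Int) := by
      simp only [List.length_cons]; push_cast; ring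
    rw [harg2] at h2
    rw [h2]
    simp

-- ===== VERDICT (by name: the statement is the Claim_ definition above) =====
theorem allele_name_adapter_spec : Claim_equal_allele_name_adapter := by
  intro allele av _
  unfold Spec_allele_name_adapter allele_name_adapter allele_name_adapter_alt
  have h := anaFold_loop av [] allele
  simp only [List.nil_append, List.length_nil, Nat.cast_zero, zero_add] at h
  rw [show PySem.List.len allele = (allele.length : Int) from PySem.List.len_eq allele]
  rw [h]
  exact List.map_congr_left (fun s _ => (anabStep_eq av s).symm)
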